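-- pv_equiv track=rewrite | github.com/flathack/FL-Lingo | src/flatlas_translator/resource_writer.py | _preview_lines_for_bucket
-- ===== SOURCE A (Python) =====
-- def _preview_lines_for_bucket(bucket: dict[str, dict[int, str]]) -> list[str]:
--     preview: list[str] = []
--     for collection_name in ("strings", "infos"):
--         for _local_id, text in sorted(bucket.get(collection_name, {}).items()):
--             raw = str(text or "").replace("\r\n", "\n")
--             for line in raw.split("\n"):
--                 clean = " ".join(line.strip().split())
--                 if not clean:
--                     continue
--                 preview.append(clean[:140])
--                 if len(preview) >= 12:
--                     return preview
--     return preview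
-- ===== SOURCE B (Python) =====
-- def _preview_lines_for_bucket(bucket):
--     # Stage 1: flatten every text, in order, into one newline-joined blob.
--     texts = []
--     for collection_name in ("strings", "infos"):
--         for _local_id, text in sorted(bucket.get(collection_name, {}).items()):
--             texts.append(str(text or "").replace("\r\n", "\n"))
--     blob = "\n".join(texts)
--     # Stage 2: one flat pass over the blob's lines.
--     preview = []
--     for line in blob.split("\n"):
--         clean = " ".join(line.strip().split())
--         if clean:
--             preview.append(clean[:140])
--             if len(preview) == 12:
--                 break
--     return preview
-- ===== Notes on version B (the rewrite author's own statement) =====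
-- stated objective: alternative
-- what changed: Instead of A's three nested loops with a counter and early return, B first flattens all normalized texts into one newline-joined blob and then makes a single flat pass over that blob's lines, collecting cleaned lines until 12.
import Mathlib
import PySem

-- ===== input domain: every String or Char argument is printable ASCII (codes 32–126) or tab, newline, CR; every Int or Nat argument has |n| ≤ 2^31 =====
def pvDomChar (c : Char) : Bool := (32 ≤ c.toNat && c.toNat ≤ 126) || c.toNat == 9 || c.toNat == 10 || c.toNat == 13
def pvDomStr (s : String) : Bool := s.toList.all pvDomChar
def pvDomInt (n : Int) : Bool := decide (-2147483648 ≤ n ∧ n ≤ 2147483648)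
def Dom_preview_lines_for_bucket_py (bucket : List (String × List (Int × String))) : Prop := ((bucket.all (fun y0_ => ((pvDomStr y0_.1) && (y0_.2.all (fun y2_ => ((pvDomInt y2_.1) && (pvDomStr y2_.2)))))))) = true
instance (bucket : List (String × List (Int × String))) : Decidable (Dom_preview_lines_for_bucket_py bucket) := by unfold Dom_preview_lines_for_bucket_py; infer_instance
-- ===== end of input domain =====

-- B is a different decomposition ('alternative', not faster): instead of A's three nested loops
-- with a counter and early return, B flattens all normalized texts into ONE newline-joined blob
-- and then makes a single flat pass over that blob's lines, stopping at 12.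

-- shared Python-semantics bridge: sorted(bucket.get(name, {}).items())
def pvSortedItems (bucket : List (String × List (Int × String))) (name : String) :
    List (Int × String) :=
  PySem.List.sorted2
    (PySem.Dict.ofList (PySem.Dict.getD (PySem.Dict.ofList bucket) name [])).items
    (fun p => p.1) (fun p => p.2)

-- str(text or "").replace("\r\n", "\n")   (shared normalization step of both Pythons)
def pvNorm (text : String) : String :=
  PySem.Str.replace (if text = "" then "" else text) "\r\n" "\n"

-- s.split("\n"): sep "\n" is nonempty, so split? is always 'some'; the getD default is never reached
def pvSplitNl (s : String) : List String :=
  (PySem.Str.split? s "\n").getD []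

-- clean = " ".join(line.strip().split())
def pvClean (line : String) : String :=
  PySem.Str.join " " (PySem.Str.split₀ (PySem.Str.strip line))

-- ===== PORT A =====
def pvA_lines (preview : List String) (lines : List String) : List String × Bool :=
  match lines with
  | [] => (preview, false)
  | line :: rest =>
    let clean := pvClean line
    if clean = "" then pvA_lines preview rest
    else
      let preview' := preview ++ [PySem.Str.slice clean none (some 140)]
      if 12 ≤ preview'.length then (preview', true)
      else pvA_lines preview' rest

def pvA_items (preview : List String) (items : List (Int × String)) : List String × Bool :=
  match items with
  | [] => (preview, false)
  | (_, text) :: rest =>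
    match pvA_lines preview (pvSplitNl (pvNorm text)) with
    | (p, true) => (p, true)
    | (p, false) => pvA_items p rest

def pvA_names (bucket : List (String × List (Int × String))) (preview : List String)
    (names : List String) : List String × Bool :=
  match names with
  | [] => (preview, false)
  | name :: rest =>
    match pvA_items preview (pvSortedItems bucket name) with
    | (p, true) => (p, true)
    | (p, false) => pvA_names bucket p rest

def preview_lines_for_bucket_py (bucket : List (String × List (Int × String))) : List String :=
  (pvA_names bucket [] ["strings", "infos"]).1

-- ===== PORT B =====
-- Stage 1: texts, built by the two nested append loops
def pvB_texts (bucket : List (String × List (Int × String))) : List String :=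
  ["strings", "infos"].flatMap (fun name =>
    (pvSortedItems bucket name).map (fun it => pvNorm it.2))

-- Stage 2: the single flat line loop with 'break' at 12
def pvB_loop (preview : List String) (lines : List String) : List String :=
  match lines with
  | [] => preview
  | line :: rest =>
    let clean := pvClean line
    if clean = "" then pvB_loop preview rest
    else
      let preview' := preview ++ [PySem.Str.slice clean none (some 140)]
      if preview'.length = 12 then preview' else pvB_loop preview' rest

def preview_lines_for_bucket_py_alt (bucket : List (String × List (Int × String))) : List String :=
  pvB_loop [] (pvSplitNl (PySem.Str.join "\n" (pvB_texts bucket)))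

-- ===== PRECONDITION & SPEC =====
def Spec_preview_lines_for_bucket_py (bucket : List (String × List (Int × String))) (out : List String) : Prop := out = preview_lines_for_bucket_py_alt bucket
instance (bucket : List (String × List (Int × String))) (out : List String) : Decidable (Spec_preview_lines_for_bucket_py bucket out) := by unfold Spec_preview_lines_for_bucket_py; infer_instance

-- ===== CLAIM (what is proved, stated in full; the proofs are below) =====
def Claim_equal_preview_lines_for_bucket_py : Prop := ∀ (bucket : List (String × List (Int × String))), Dom_preview_lines_for_bucket_py bucket → Spec_preview_lines_for_bucket_py bucket (preview_lines_for_bucket_py bucket)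

-- ===== LEMMAS AND PROOFS =====

-- one cleaned-or-dropped line (the common value both loops append / skip)
def pvCleaned (line : String) : Option String :=
  let clean := pvClean line
  if clean = "" then none else some (PySem.Str.slice clean none (some 140))

-- reference single-char '\n' splitter over List Char
def pvSplitNLC : List Char → List (List Char)
  | [] => [[]]
  | c :: r => if c = '\n' then [] :: pvSplitNLC r else (pvSplitNLC r).modifyHead (c :: ·)

theorem pvSplitNLC_ne_nil (l : List Char) : pvSplitNLC l ≠ [] := by
  cases l with
  | nil => simp [pvSplitNLC]
  | cons c r =>
    simp only [pvSplitNLC]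
    split_ifs
    · simp
    · have := pvSplitNLC_ne_nil r
      cases h : pvSplitNLC r with
      | nil => exact absurd h this
      | cons a t => simp

theorem pvGo_eq (fuel : Nat) (l cur : List Char) (acc : List (List Char))
    (h : l.length < fuel) :
    PySem.Chars.splitOn.go ['\n'] fuel l cur acc =
      acc.reverse ++ (pvSplitNLC l).modifyHead (cur.reverse ++ ·) := by
  induction fuel generalizing l cur acc with
  | zero => omega
  | succ fuel ih =>
    cases l with
    | nil =>
      rw [PySem.Chars.splitOn.go.eq_def]
      simp [pvSplitNLC]
    | cons c rest =>
      rw [PySem.Chars.splitOn.go.eq_def]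
      simp only [List.length_cons] at h
      by_cases hc : c = '\n'
      · subst hc
        have hpre : List.isPrefixOf ['\n'] ('\n' :: rest) = true := by
          simp [List.isPrefixOf]
        simp only [hpre, List.length_singleton, List.drop_succ_cons, List.drop_zero, pvSplitNLC]
        rw [ih rest [] (cur.reverse :: acc) (by omega)]
        simp only [List.modifyHead, List.reverse_cons, List.append_assoc, List.singleton_append]
        cases pvSplitNLC rest <;> simp
      · have hpre : List.isPrefixOf ['\n'] (c :: rest) = false := by
          simp [List.isPrefixOf]
          intro h'; exact hc h'.symm
        simp only [hpre]
        rw [if_neg (by simp)]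
        rw [ih rest (c :: cur) acc (by omega)]
        simp only [pvSplitNLC, if_neg hc]
        cases hs : pvSplitNLC rest with
        | nil => exact absurd hs (pvSplitNLC_ne_nil rest)
        | cons a t => simp [hs, List.modifyHead]

theorem pvSplitOn_nl (s : List Char) :
    PySem.Chars.splitOn s ['\n'] = pvSplitNLC s := by
  unfold PySem.Chars.splitOn
  rw [pvGo_eq (s.length + 1) s [] [] (by omega)]
  cases hs : pvSplitNLC s with
  | nil => exact absurd hs (pvSplitNLC_ne_nil s)
  | cons a t => simp [List.modifyHead]

theorem pvSplitNLC_append (a b : List Char) :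
    pvSplitNLC (a ++ '\n' :: b) = pvSplitNLC a ++ pvSplitNLC b := by
  induction a with
  | nil => simp [pvSplitNLC]
  | cons c a ih =>
    by_cases hc : c = '\n'
    · subst hc; simp [pvSplitNLC, ih]
    · simp only [List.cons_append, pvSplitNLC, if_neg hc, ih]
      cases hs : pvSplitNLC a with
      | nil => exact absurd hs (pvSplitNLC_ne_nil a)
      | cons x t => simp

theorem pvSplitNLC_intercalate (t : List Char) (ts : List (List Char)) :
    pvSplitNLC (List.intercalate ['\n'] (t :: ts)) =
      pvSplitNLC t ++ ts.flatMap pvSplitNLC := by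
  induction ts generalizing t with
  | nil => simp [List.intercalate]
  | cons u ts ih =>
    have : List.intercalate ['\n'] (t :: u :: ts) =
        t ++ '\n' :: List.intercalate ['\n'] (u :: ts) := by
      simp [List.intercalate, List.intersperse]
    rw [this, pvSplitNLC_append, ih]
    simp

-- String-level: map toList of s.split("\n")
theorem pvSplitNl_toList (s : String) :
    (pvSplitNl s).map String.toList = pvSplitNLC s.toList := by
  have h := PySem.Str.split?_map s "\n"
  have hsep : ("\n" : String).toList = ['\n'] := rfl
  rw [hsep] at h
  unfold PySem.Chars.split? at h
  simp only [List.isEmpty_cons] at h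
  rw [pvSplitOn_nl] at h
  unfold pvSplitNl
  cases ho : PySem.Str.split? s "\n" with
  | none => rw [ho] at h; simp at h
  | some L =>
    rw [ho] at h
    simpa using h

-- join-then-split equals per-text split, for a nonempty text list
theorem pvSplit_join (texts : List String) (h : texts ≠ []) :
    pvSplitNl (PySem.Str.join "\n" texts) = texts.flatMap pvSplitNl := by
  apply List.map_injective_iff.mpr (fun a b => String.toList_injective)
  rw [pvSplitNl_toList, List.map_flatMap]
  have hj : (PySem.Str.join "\n" texts).toList =
      PySem.Chars.join ['\n'] (texts.map String.toList) := PySem.Str.toList_join "\n" texts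
  rw [hj]
  cases texts with
  | nil => exact absurd rfl h
  | cons t ts =>
    unfold PySem.Chars.join
    rw [List.map_cons, pvSplitNLC_intercalate]
    simp only [List.flatMap_def, List.map_map, Function.comp_def, pvSplitNl_toList]
    simp

-- A's inner line loop characterized by take 12 of the cleaned lines
theorem pvA_lines_eq (preview : List String) (lines : List String)
    (h : preview.length < 12) :
    pvA_lines preview lines =
      ((preview ++ lines.filterMap pvCleaned).take 12,
        decide (12 ≤ preview.length + (lines.filterMap pvCleaned).length)) := by
  induction lines generalizing preview with
  | nil =>
    simp only [pvA_lines, List.filterMap_nil, List.append_nil, List.length_nil, Nat.add_zero,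
      Prod.mk.injEq]
    exact ⟨(List.take_of_length_le (by omega)).symm,
      by rw [eq_comm, decide_eq_false_iff_not]; omega⟩
  | cons line rest ih =>
    have hline : pvCleaned line =
        if pvClean line = "" then none
        else some (PySem.Str.slice (pvClean line) none (some 140)) := rfl
    by_cases hc : pvClean line = ""
    · simp only [pvA_lines, List.filterMap_cons, hline, hc, ite_true]
      exact ih preview h
    · simp only [pvA_lines, List.filterMap_cons, hline, if_neg hc]
      by_cases h12 : 12 ≤ (preview ++ [PySem.Str.slice (pvClean line) none (some 140)]).length
      · have hl : preview.length = 11 := by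
          simp only [List.length_append, List.length_singleton] at h12; omega
        simp only [if_pos h12, Prod.mk.injEq]
        refine ⟨?_, ?_⟩
        · rw [show preview ++ PySem.Str.slice (pvClean line) none (some 140) ::
              rest.filterMap pvCleaned =
              (preview ++ [PySem.Str.slice (pvClean line) none (some 140)]) ++
              rest.filterMap pvCleaned by simp,
            List.take_append_of_le_length (by simp [hl]),
            List.take_of_length_le (by simp [hl])]
        · rw [eq_comm, decide_eq_true_eq, List.length_cons, hl]; omega
      · simp only [if_neg h12]
        have h' : (preview ++ [PySem.Str.slice (pvClean line) none (some 140)]).length < 12 := by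
          omega
        rw [ih _ h']
        simp only [List.append_assoc, List.singleton_append, List.length_append,
          List.length_nil, List.length_cons, Prod.mk.injEq]
        exact ⟨by trivial, by rw [decide_eq_decide]; omega⟩

theorem pvA_items_eq (preview : List String) (items : List (Int × String))
    (h : preview.length < 12) :
    pvA_items preview items =
      ((preview ++ items.flatMap (fun it => (pvSplitNl (pvNorm it.2)).filterMap pvCleaned)).take 12,
        decide (12 ≤ preview.length +
          (items.flatMap (fun it => (pvSplitNl (pvNorm it.2)).filterMap pvCleaned)).length)) := by
  induction items generalizing preview with
  | nil =>
    simp only [pvA_items, List.flatMap_nil, List.append_nil, List.length_nil, Nat.add_zero,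
      Prod.mk.injEq]
    exact ⟨(List.take_of_length_le (by omega)).symm,
      by rw [eq_comm, decide_eq_false_iff_not]; omega⟩
  | cons it rest ih =>
    obtain ⟨i, text⟩ := it
    simp only [pvA_items, List.flatMap_cons]
    rw [pvA_lines_eq preview (pvSplitNl (pvNorm text)) h]
    by_cases h12 : 12 ≤ preview.length + ((pvSplitNl (pvNorm text)).filterMap pvCleaned).length
    · simp only [decide_eq_true h12, Prod.mk.injEq]
      refine ⟨?_, ?_⟩
      · conv_rhs => rw [← List.append_assoc]
        exact (List.take_append_of_le_length
          (by simp only [List.length_append]; omega)).symm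
      · rw [eq_comm, decide_eq_true_eq, List.length_append]; omega
    · simp only [decide_eq_false h12]
      have hlt : (preview ++ (pvSplitNl (pvNorm text)).filterMap pvCleaned).length < 12 := by
        simp only [List.length_append]; omega
      rw [List.take_of_length_le (le_of_lt hlt), ih _ hlt]
      simp only [List.append_assoc, List.length_append, Prod.mk.injEq]
      exact ⟨by trivial, by rw [decide_eq_decide]; omega⟩

theorem pvA_names_eq (bucket : List (String × List (Int × String))) (preview : List String)
    (names : List String) (h : preview.length < 12) :
    pvA_names bucket preview names =
      ((preview ++ names.flatMap (fun name =>
          (pvSortedItems bucket name).flatMap (fun it =>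
            (pvSplitNl (pvNorm it.2)).filterMap pvCleaned))).take 12,
        decide (12 ≤ preview.length +
          (names.flatMap (fun name =>
            (pvSortedItems bucket name).flatMap (fun it =>
              (pvSplitNl (pvNorm it.2)).filterMap pvCleaned))).length)) := by
  induction names generalizing preview with
  | nil =>
    simp only [pvA_names, List.flatMap_nil, List.append_nil, List.length_nil, Nat.add_zero,
      Prod.mk.injEq]
    exact ⟨(List.take_of_length_le (by omega)).symm,
      by rw [eq_comm, decide_eq_false_iff_not]; omega⟩
  | cons name rest ih =>
    simp only [pvA_names, List.flatMap_cons]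
    rw [pvA_items_eq preview (pvSortedItems bucket name) h]
    by_cases h12 : 12 ≤ preview.length +
        ((pvSortedItems bucket name).flatMap (fun it =>
          (pvSplitNl (pvNorm it.2)).filterMap pvCleaned)).length
    · simp only [decide_eq_true h12, Prod.mk.injEq]
      refine ⟨?_, ?_⟩
      · conv_rhs => rw [← List.append_assoc]
        exact (List.take_append_of_le_length
          (by simp only [List.length_append]; omega)).symm
      · rw [eq_comm, decide_eq_true_eq, List.length_append]; omega
    · simp only [decide_eq_false h12]
      have hlt : (preview ++ (pvSortedItems bucket name).flatMap (fun it =>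
          (pvSplitNl (pvNorm it.2)).filterMap pvCleaned)).length < 12 := by
        simp only [List.length_append]; omega
      rw [List.take_of_length_le (le_of_lt hlt), ih _ hlt]
      simp only [List.append_assoc, List.length_append, Prod.mk.injEq]
      exact ⟨by trivial, by rw [decide_eq_decide]; omega⟩

-- B's flat loop characterized the same way
theorem pvB_loop_eq (preview : List String) (lines : List String)
    (h : preview.length < 12) :
    pvB_loop preview lines = (preview ++ lines.filterMap pvCleaned).take 12 := by
  induction lines generalizing preview with
  | nil =>
    simp only [pvB_loop, List.filterMap_nil, List.append_nil]
    exact (List.take_of_length_le (by omega)).symm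
  | cons line rest ih =>
    have hline : pvCleaned line =
        if pvClean line = "" then none
        else some (PySem.Str.slice (pvClean line) none (some 140)) := rfl
    by_cases hc : pvClean line = ""
    · simp only [pvB_loop, List.filterMap_cons, hline, hc, ite_true]
      exact ih preview h
    · simp only [pvB_loop, List.filterMap_cons, hline, if_neg hc]
      by_cases h12 : (preview ++ [PySem.Str.slice (pvClean line) none (some 140)]).length = 12
      · have hl : preview.length = 11 := by
          simp only [List.length_append, List.length_singleton] at h12; omega
        simp only [if_pos h12]
        rw [show preview ++ PySem.Str.slice (pvClean line) none (some 140) ::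
            rest.filterMap pvCleaned =
            (preview ++ [PySem.Str.slice (pvClean line) none (some 140)]) ++
            rest.filterMap pvCleaned by simp,
          List.take_append_of_le_length (by simp [hl]),
          List.take_of_length_le (by simp [hl])]
      · simp only [if_neg h12]
        have h' : (preview ++ [PySem.Str.slice (pvClean line) none (some 140)]).length < 12 := by
          simp only [List.length_append, List.length_singleton]
          simp only [List.length_append, List.length_singleton] at h12
          omega
        rw [ih _ h']
        simp

-- ===== VERDICT (by name: the statement is the Claim_ definition above) =====
theorem preview_lines_for_bucket_py_spec : Claim_equal_preview_lines_for_bucket_py := by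
  intro bucket _
  unfold Spec_preview_lines_for_bucket_py preview_lines_for_bucket_py
    preview_lines_for_bucket_py_alt
  rw [pvA_names_eq bucket [] ["strings", "infos"] (by simp),
    pvB_loop_eq [] _ (by simp)]
  simp only [List.nil_append]
  by_cases hemp : pvB_texts bucket = []
  · -- empty texts: blob is "", whose single empty line cleans away
    have hflat : ["strings", "infos"].flatMap (fun name =>
        (pvSortedItems bucket name).flatMap (fun it =>
          (pvSplitNl (pvNorm it.2)).filterMap pvCleaned)) = [] := by
      have : ∀ name ∈ ["strings", "infos"], pvSortedItems bucket name = [] := by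
        intro name hn
        have := congrArg (List.length) hemp
        simp only [pvB_texts, List.flatMap_cons, List.flatMap_nil, List.append_nil,
          List.length_append, List.length_map, List.length_nil] at this
        fin_cases hn <;> simp_all [List.length_eq_zero_iff]
      simp only [List.flatMap_cons, List.flatMap_nil, List.append_nil]
      rw [this "strings" (by simp), this "infos" (by simp)]
      simp
    rw [hflat, hemp]
    have : pvSplitNl (PySem.Str.join "\n" []) = [""] := by decide
    rw [this]
    have : List.filterMap pvCleaned [""] = [] := by decide
    rw [this]
  · rw [pvSplit_join _ hemp, List.filterMap_flatMap]
    unfold pvB_texts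
    simp [List.flatMap_map]
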